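-- pv_equiv track=rewrite | github.com/SaralG5/Y3S1 | binary_boyermoore.py | biggest_smaller
-- ===== SOURCE A (Python) =====
-- def biggest_smaller(a_list, a_value):
--     """
--     @complexity_space: O(n) where n is the length of a_list
--     @complexity_time: O(logn) where n is the length of a_list, since we search half the list after each numeric comparison.
--     :param a_list: a list containing numbers.
--     :param a_value: a given integer value
--     :return: the index of the biggest number that is smaller than a_value, and the number itself
--     Extra Information: This function is pretty much just a modified binary search. It will help us in Boyer Moore since
--     it can help to find the rightmost occurrence of a mismatched letter from some index, k.
--     """
--     left = 0
--     right = len(a_list) - 1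
--     if right == left:  # this means our list only has one element
--         # for this we will just output the list element
--         return a_list[0]
--
--     while left <= right:  # while two dividing areas are not the same
--         middle = (left + right) // 2
--
--         if right == left + 1:  # this means we did not find the element
--             # now check if the right or left elements are smaller than a_value
--             if a_list[right] < a_value:
--                 return a_list[right]
--
--             elif a_list[left] < a_value:
--                 return a_list[left]
--
--             else:  # if the first two cases above did not hold, that means that a_value is smaller than everything in
--                 # the list . In this case it would make most sense to just output a value so we know this happens.
--                 return -1
--
--         elif a_value > a_list[middle]:
--             # if middle element is smaller than the one we are looking for
--             left = middle  # set left to be the middle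
--
--         elif a_value < a_list[middle]:  # if the middle element is bigger than the one we are looking for
--             right = middle  # set right to be the middle
--
--         else:  # here we actually found the element
--             return a_list[middle - 1]
-- ===== SOURCE B (Python) =====
-- def biggest_smaller(a_list, a_value):
--     """Recursive re-implementation: the halving loop becomes a helper rec(left, right)."""
--     if len(a_list) == 1:
--         return a_list[0]
--
--     def rec(left, right):
--         if right - left <= 1:
--             if a_list[right] < a_value:
--                 return a_list[right]
--             if a_list[left] < a_value:
--                 return a_list[left]
--             return -1
--         middle = (left + right) // 2
--         if a_list[middle] == a_value:
--             return a_list[middle - 1]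
--         if a_list[middle] < a_value:
--             return rec(middle, right)
--         return rec(left, middle)
--
--     return rec(0, len(a_list) - 1)
-- ===== Notes on version B (the rewrite author's own statement) =====
-- stated objective: alternative
-- what changed: The iterative while-loop binary search with mutable left/right is re-decomposed as a recursive helper rec(left,right) that tests equality first and compares a_list[middle] < a_value instead of a_value > a_list[middle], with a merged gap<=1 base case.
-- outside the precondition, e.g. on biggest_smaller([], 3): A returns None, B raises IndexError
import Mathlib
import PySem

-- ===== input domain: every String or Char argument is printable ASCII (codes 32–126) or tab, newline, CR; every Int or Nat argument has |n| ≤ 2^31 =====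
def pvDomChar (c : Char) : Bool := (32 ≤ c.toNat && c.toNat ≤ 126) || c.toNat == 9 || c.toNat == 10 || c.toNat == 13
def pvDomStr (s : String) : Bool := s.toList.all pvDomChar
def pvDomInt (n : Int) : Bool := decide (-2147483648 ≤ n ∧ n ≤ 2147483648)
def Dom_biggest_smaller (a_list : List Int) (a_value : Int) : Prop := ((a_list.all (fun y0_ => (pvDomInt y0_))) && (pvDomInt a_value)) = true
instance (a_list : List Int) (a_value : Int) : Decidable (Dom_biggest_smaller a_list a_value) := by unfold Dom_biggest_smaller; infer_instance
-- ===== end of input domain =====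

-- B re-decomposes A's iterative binary-search loop as a recursive helper on Nat indices
-- (equality tested first, flipped comparisons); equivalence of return values on nonempty lists.


-- ===== PORT A =====
-- A's while-loop, transliterated with Int indices and a fuel bound (fuel = len a_list is
-- never exhausted on the admitted inputs; fuel-out and loop-fall-through return 0, unreachable under Pre_).
def pvALoop (a_list : List Int) (a_value : Int) : Nat → Int → Int → Int
  | 0, _, _ => 0
  | fuel + 1, left, right =>
    if left ≤ right then
      let middle := PySem.Int.floordiv (left + right) 2
      if right = left + 1 then
        if (PySem.List.pyGet? a_list right).getD 0 < a_value then (PySem.List.pyGet? a_list right).getD 0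
        else if (PySem.List.pyGet? a_list left).getD 0 < a_value then (PySem.List.pyGet? a_list left).getD 0
        else -1
      else if a_value > (PySem.List.pyGet? a_list middle).getD 0 then pvALoop a_list a_value fuel middle right
      else if a_value < (PySem.List.pyGet? a_list middle).getD 0 then pvALoop a_list a_value fuel left middle
      else (PySem.List.pyGet? a_list (middle - 1)).getD 0
    else 0

def biggest_smaller (a_list : List Int) (a_value : Int) : Int :=
  let left : Int := 0
  let right : Int := (a_list.length : Int) - 1
  if right = left then (PySem.List.pyGet? a_list 0).getD 0
  else pvALoop a_list a_value a_list.length left right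

-- ===== PORT B =====
-- B's recursive helper rec(left, right), on Nat indices (they are nonnegative throughout).
def pvBRec (a_list : List Int) (a_value : Int) (left right : Nat) : Int :=
  if _h : right ≤ left + 1 then
    if a_list.getD right 0 < a_value then a_list.getD right 0
    else if a_list.getD left 0 < a_value then a_list.getD left 0
    else -1
  else
    let middle := (left + right) / 2
    if a_list.getD middle 0 = a_value then a_list.getD (middle - 1) 0
    else if a_list.getD middle 0 < a_value then pvBRec a_list a_value middle right
    else pvBRec a_list a_value left middle
termination_by right - left
decreasing_by all_goals omega

def biggest_smaller_alt (a_list : List Int) (a_value : Int) : Int :=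
  if a_list.length = 1 then a_list.getD 0 0
  else pvBRec a_list a_value 0 (a_list.length - 1)

-- ===== PRECONDITION & SPEC =====
-- Pre_ excludes only the empty list, on which A falls through the loop and returns None (not an int).
def Pre_biggest_smaller (a_list : List Int) (a_value : Int) : Prop := a_list ≠ []
instance (a_list : List Int) (a_value : Int) : Decidable (Pre_biggest_smaller a_list a_value) := by unfold Pre_biggest_smaller; infer_instance
def pvWitness_biggest_smaller : List Int × Int := ([2, 5, 7, 9], 8)

def Spec_biggest_smaller (a_list : List Int) (a_value : Int) (out : Int) : Prop := out = biggest_smaller_alt a_list a_value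
instance (a_list : List Int) (a_value : Int) (out : Int) : Decidable (Spec_biggest_smaller a_list a_value out) := by unfold Spec_biggest_smaller; infer_instance

-- ===== CLAIM (what is proved, stated in full; the proofs are below) =====
def Claim_equal_biggest_smaller : Prop := ∀ (a_list : List Int) (a_value : Int), Dom_biggest_smaller a_list a_value → Pre_biggest_smaller a_list a_value → Spec_biggest_smaller a_list a_value (biggest_smaller a_list a_value)

-- ===== LEMMAS AND PROOFS =====

-- Core invariant: on a live bracket 0 ≤ l < r < len, with enough fuel, A's loop equals B's recursion.
lemma pv_loop_eq (a_list : List Int) (a_value : Int) :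
    ∀ (fuel : Nat) (l r : Int), 0 ≤ l → l < r → r < (a_list.length : Int) →
      (r - l) ≤ (fuel : Int) →
      pvALoop a_list a_value fuel l r = pvBRec a_list a_value l.toNat r.toNat := by
  intro fuel
  induction fuel with
  | zero => intro l r h0 hlr hr hf; omega
  | succ f ih =>
    intro l r h0 hlr hr hf
    have hle : l ≤ r := le_of_lt hlr
    have hget : ∀ i : Int, 0 ≤ i → i < (a_list.length : Int) →
        (PySem.List.pyGet? a_list i).getD 0 = a_list.getD i.toNat 0 := by
      intro i hi0 hin
      rw [PySem.List.pyGet?_of_nonneg a_list hi0]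
      simp [List.getD]
    rw [pvALoop, pvBRec]
    rw [if_pos hle]
    by_cases hbase : r = l + 1
    · have hb' : r.toNat ≤ l.toNat + 1 := by omega
      rw [if_pos hbase, dif_pos hb']
      rw [hget r (by omega) hr, hget l h0 (by omega)]
    · have hb' : ¬ r.toNat ≤ l.toNat + 1 := by omega
      rw [if_neg hbase, dif_neg hb']
      have hfd : PySem.Int.floordiv (l + r) 2 = (l + r) / 2 :=
        PySem.Int.floordiv_eq_ediv_of_pos (by omega)
      have hm : PySem.Int.floordiv (l + r) 2 = (((l.toNat + r.toNat) / 2 : Nat) : Int) := by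
        rw [hfd]; omega
      set m : Int := PySem.Int.floordiv (l + r) 2 with hmdef
      have hm0 : 0 ≤ m := by omega
      have hml : l < m := by omega
      have hmr : m < r := by omega
      have hmn : m < (a_list.length : Int) := by omega
      have hmtn : m.toNat = (l.toNat + r.toNat) / 2 := by omega
      rw [hget m hm0 hmn, hmtn]
      rcases lt_trichotomy (a_list.getD ((l.toNat + r.toNat) / 2) 0) a_value with hc | hc | hc
      · rw [if_pos hc, if_neg (by omega), if_pos hc]
        rw [ih m r hm0 hmr hr (by omega), hmtn]
      · rw [if_neg (by omega), if_neg (by omega), if_pos hc]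
        rw [hget (m - 1) (by omega) (by omega)]
        congr 1
        omega
      · rw [if_neg (by omega), if_pos hc, if_neg (by omega), if_neg (by omega)]
        rw [ih l m h0 hml hmn (by omega), hmtn]

-- ===== VERDICT (by name: the statement is the Claim_ definition above) =====
theorem biggest_smaller_spec : Claim_equal_biggest_smaller := by
  intro a_list a_value _ hpre
  unfold Spec_biggest_smaller biggest_smaller biggest_smaller_alt
  have hn : 0 < a_list.length := List.length_pos_iff.mpr hpre
  by_cases h1 : a_list.length = 1
  · rw [if_pos (by omega), if_pos h1]
    rw [PySem.List.pyGet?_of_nonneg a_list (by omega)]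
    simp [List.getD]
  · rw [if_neg (by omega), if_neg h1]
    have := pv_loop_eq a_list a_value a_list.length 0 ((a_list.length : Int) - 1)
      (by omega) (by omega) (by omega) (by omega)
    simpa using this
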